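-- pv_equiv track=rewrite | github.com/adpn/dslr | utils.py | separateHouses
-- ===== SOURCE A (Python) =====
-- def separateHouses(content : dict[str, list[str]]) -> dict[str, dict[str, list[str]]]:
-- 	house_data : dict[str, dict[str, list[str]]] = {}
-- 	for key, values in content.items():
-- 		if key == "Hogwarts House":
-- 			continue
-- 		for i in range(len(values)):
-- 			house = content["Hogwarts House"][i]
-- 			if not house:
-- 				continue
-- 			if house not in house_data:
-- 				house_data[house] = {}
-- 			if key not in house_data[house]:
-- 				house_data[house][key] = []
-- 			house_data[house][key].append(values[i])
-- 	return house_data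
-- ===== SOURCE B (Python) =====
-- def separateHouses(content : dict[str, list[str]]) -> dict[str, dict[str, list[str]]]:
-- 	houses = content.get("Hogwarts House", [])
-- 	house_indices: dict[str, list[int]] = {}
-- 	for i, house in enumerate(houses):
-- 		if house:
-- 			house_indices.setdefault(house, []).append(i)
-- 	house_data: dict[str, dict[str, list[str]]] = {}
-- 	for key, values in content.items():
-- 		if key == "Hogwarts House":
-- 			continue
-- 		for house, idxs in house_indices.items():
-- 			vals = [values[i] for i in idxs if i < len(values)]
-- 			if vals:
-- 				house_data.setdefault(house, {})[key] = vals
-- 	return house_data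
-- ===== Notes on version B (the rewrite author's own statement) =====
-- stated objective: alternative
-- what changed: A fills the nested dict row by row inside a key-major double loop that re-reads the house column for every cell; B first builds an index map house -> row indices in one pass over the house column and then assembles each house/key group directly from those indices.
import Mathlib
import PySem

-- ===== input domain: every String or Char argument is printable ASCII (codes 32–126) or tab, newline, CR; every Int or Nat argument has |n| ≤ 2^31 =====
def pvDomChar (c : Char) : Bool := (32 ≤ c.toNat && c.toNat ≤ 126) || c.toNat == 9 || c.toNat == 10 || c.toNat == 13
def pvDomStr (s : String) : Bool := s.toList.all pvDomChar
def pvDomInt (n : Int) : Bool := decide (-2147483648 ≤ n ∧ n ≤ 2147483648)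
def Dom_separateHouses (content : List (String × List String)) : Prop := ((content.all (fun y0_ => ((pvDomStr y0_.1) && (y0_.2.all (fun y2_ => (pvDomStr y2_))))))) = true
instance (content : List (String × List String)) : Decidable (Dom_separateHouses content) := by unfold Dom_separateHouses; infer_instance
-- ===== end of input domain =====

-- B replaces A's row-by-row dict building (which re-reads the house column per cell) with a
-- precomputed house -> row-indices map used to assemble each group directly (objective: alternative).
-- ===== PORT A =====
-- body of A's inner 'for i in range(len(values))' loop
def pvInnerA (hh : Option (List String)) (k : String) (values : List String)
    (hd : PySem.Dict String (PySem.Dict String (List String))) (i : Int) :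
    PySem.Dict String (PySem.Dict String (List String)) :=
  match hh.bind (fun hs => PySem.List.pyGet? hs i) with
  | none => hd
  | some house =>
    if house = "" then hd
    else
      match PySem.List.pyGet? values i with
      | none => hd
      | some v =>
        let hm := hd.getD house PySem.Dict.empty
        let hm2 := if hm.contains k then hm else hm.insert k []
        hd.insert house (hm2.insert k (hm2.getD k [] ++ [v]))

def separateHouses (content : List (String × List String)) : List (String × List (String × List String)) :=
  let d := PySem.Dict.ofList content
  let hh := d.get? "Hogwarts House"
  let hd := d.items.foldl (fun hd kv =>
      if kv.1 = "Hogwarts House" then hd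
      else (PySem.List.pyRange 0 (kv.2.length : Int) 1).foldl (pvInnerA hh kv.1 kv.2) hd)
    PySem.Dict.empty
  hd.items.map (fun p => (p.1, p.2.items))

-- ===== PORT B =====
def separateHouses_alt (content : List (String × List String)) : List (String × List (String × List String)) :=
  let d := PySem.Dict.ofList content
  let houses := d.getD "Hogwarts House" []
  let hi := (PySem.List.enumerate houses).foldl (fun hi p =>
      if p.2 = "" then hi else hi.insert p.2 (hi.getD p.2 [] ++ [p.1])) PySem.Dict.empty
  let hd := d.items.foldl (fun hd kv =>
      if kv.1 = "Hogwarts House" then hd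
      else hi.items.foldl (fun hd hp =>
        let vals := hp.2.foldl (fun acc i =>
          if i < (kv.2.length : Int) then acc ++ [PySem.List.pyGetD kv.2 i ""] else acc) []
        if vals = [] then hd
        else hd.insert hp.1 ((hd.getD hp.1 PySem.Dict.empty).insert kv.1 vals)) hd)
    PySem.Dict.empty
  hd.items.map (fun p => (p.1, p.2.items))

-- ===== PRECONDITION & SPEC =====
-- Pre_ is exactly A's domain: A raises (KeyError/IndexError on content["Hogwarts House"][i])
-- iff some non-house column is longer than the house column (the missing house column counts as
-- length 0); no input on which A returns is excluded.
def Pre_separateHouses (content : List (String × List String)) : Prop :=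
  ∀ kv ∈ (PySem.Dict.ofList content).items, kv.1 ≠ "Hogwarts House" →
    kv.2.length ≤ ((PySem.Dict.ofList content).getD "Hogwarts House" []).length

instance (content : List (String × List String)) : Decidable (Pre_separateHouses content) := by
  unfold Pre_separateHouses; infer_instance

def pvWitness_separateHouses : (List (String × List String)) :=
  [("Hogwarts House", ["G", "H", "G"]), ("Age", ["1", "2", "3"])]

def Spec_separateHouses (content : List (String × List String)) (out : List (String × List (String × List String))) : Prop := out = separateHouses_alt content
instance (content : List (String × List String)) (out : List (String × List (String × List String))) : Decidable (Spec_separateHouses content out) := by unfold Spec_separateHouses; infer_instance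

-- ===== CLAIM (what is proved, stated in full; the proofs are below) =====
def Claim_equal_separateHouses : Prop := ∀ (content : List (String × List String)), Dom_separateHouses content → Pre_separateHouses content → Spec_separateHouses content (separateHouses content)

-- ===== LEMMAS AND PROOFS =====

def pvUpd (k : String) (c : List String) (m : PySem.Dict String (List String)) :
    PySem.Dict String (List String) :=
  if c = [] then m else m.insert k (m.getD k [] ++ c)

theorem pv_updOnce (k x : String) (m : PySem.Dict String (List String)) :
    (let hm2 := if m.contains k then m else m.insert k [];
     hm2.insert k (hm2.getD k [] ++ [x])) = m.insert k (m.getD k [] ++ [x]) := by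
  by_cases hc : m.contains k
  · simp [hc]
  · simp only [hc, Bool.false_eq_true, if_false]
    have h0 : m.getD k [] = [] := PySem.Dict.getD_of_not_contains m [] (by simp [hc])
    rw [PySem.Dict.getD_insert_self, PySem.Dict.insert_insert_self, h0]

theorem pv_U (k x : String) (c : List String) (m : PySem.Dict String (List String)) :
    pvUpd k c (m.insert k (m.getD k [] ++ [x])) = pvUpd k (x :: c) m := by
  unfold pvUpd
  rcases c with _ | ⟨y, c⟩
  · simp
  · simp only [if_false, reduceCtorEq]
    rw [PySem.Dict.getD_insert_self, PySem.Dict.insert_insert_self]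
    simp

def pvSeenRec : List String → List String → List String
  | _, [] => []
  | ks, h :: t => if h ≠ "" ∧ h ∉ ks then h :: pvSeenRec (ks ++ [h]) t else pvSeenRec ks t

theorem pv_mem_seenRec {hs ks : List String} {h : String} (hm : h ∈ pvSeenRec ks hs) :
    h ≠ "" ∧ h ∉ ks ∧ h ∈ hs := by
  induction hs generalizing ks with
  | nil => simp [pvSeenRec] at hm
  | cons a t ih =>
    by_cases hc : a ≠ "" ∧ a ∉ ks
    · rw [pvSeenRec, if_pos hc] at hm
      rcases List.mem_cons.mp hm with rfl | hm
      · exact ⟨hc.1, hc.2, List.mem_cons_self⟩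
      · obtain ⟨h1, h2, h3⟩ := ih hm
        refine ⟨h1, fun hk => h2 (by simp [hk]), List.mem_cons_of_mem _ h3⟩
    · rw [pvSeenRec, if_neg hc] at hm
      obtain ⟨h1, h2, h3⟩ := ih hm
      exact ⟨h1, h2, List.mem_cons_of_mem _ h3⟩

theorem pv_mapFstZip : ∀ (vs H : List String), vs.length ≤ H.length →
    (H.zip vs).map (·.1) = H.take vs.length := by
  intro vs
  induction vs with
  | nil => intro H _; simp
  | cons v vs ih =>
    intro H hlen
    cases H with
    | nil => simp at hlen
    | cons a H =>
      rw [List.zip_cons_cons, List.map_cons, List.length_cons, List.take_succ_cons,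
        ih H (by simpa using hlen)]

theorem pv_mem_seenRec_of_mem {hs : List String} {h : String} : ∀ {ks : List String},
    h ∈ hs → h ≠ "" → h ∈ ks ∨ h ∈ pvSeenRec ks hs := by
  induction hs with
  | nil => simp
  | cons a t ih =>
    intro ks hm hne
    by_cases hc : a ≠ "" ∧ a ∉ ks
    · rw [pvSeenRec, if_pos hc]
      rcases List.mem_cons.mp hm with rfl | hm
      · right; exact List.mem_cons_self
      · rcases ih (ks := ks ++ [a]) hm hne with hk | hk
        · rcases List.mem_append.mp hk with hk | hk
          · exact Or.inl hk
          · right; rw [List.mem_singleton] at hk; subst hk; exact List.mem_cons_self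
        · right; exact List.mem_cons_of_mem _ hk
    · rw [pvSeenRec, if_neg hc]
      rcases List.mem_cons.mp hm with rfl | hm
      · left
        rcases not_and_or.mp hc with h1 | h1
        · exact absurd (not_not.mp (by simpa using h1)) hne
        · exact not_not.mp h1
      · exact ih hm hne

theorem pv_seenRec_nodup (hs : List String) : ∀ ks, (pvSeenRec ks hs).Nodup := by
  induction hs with
  | nil => intro ks; simp [pvSeenRec]
  | cons a t ih =>
    intro ks
    by_cases hc : a ≠ "" ∧ a ∉ ks
    · rw [pvSeenRec, if_pos hc]
      refine List.nodup_cons.mpr ⟨fun hm => ?_, ih _⟩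
      exact (pv_mem_seenRec hm).2.1 (by simp)
    · rw [pvSeenRec, if_neg hc]; exact ih _

def pvCol (h : String) (R : List (String × String)) : List String :=
  (R.filter (fun p => p.1 = h)).map (·.2)

def pvStep (k : String) (hd : PySem.Dict String (PySem.Dict String (List String)))
    (p : String × String) : PySem.Dict String (PySem.Dict String (List String)) :=
  if p.1 = "" then hd
  else
    let hm := hd.getD p.1 PySem.Dict.empty
    let hm2 := if hm.contains k then hm else hm.insert k []
    hd.insert p.1 (hm2.insert k (hm2.getD k [] ++ [p.2]))

theorem pvCol_cons (h g x : String) (R : List (String × String)) :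
    pvCol h ((g, x) :: R) = if g = h then x :: pvCol h R else pvCol h R := by
  by_cases hg : g = h <;> simp [pvCol, hg]

theorem pvStep_eq (k : String) (hd : PySem.Dict String (PySem.Dict String (List String)))
    (h x : String) (hne : h ≠ "") :
    pvStep k hd (h, x)
      = hd.insert h ((hd.getD h PySem.Dict.empty).insert k
          ((hd.getD h PySem.Dict.empty).getD k [] ++ [x])) := by
  have := pv_updOnce k x (hd.getD h PySem.Dict.empty)
  simp only [pvStep, hne, if_false] at *
  rw [← this]

theorem pvG (k : String) (R : List (String × String)) :
    ∀ (hd : PySem.Dict String (PySem.Dict String (List String))),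
    hd.keys.Nodup → "" ∉ hd.keys →
    (R.foldl (pvStep k) hd).items
      = hd.items.map (fun p => (p.1, pvUpd k (pvCol p.1 R) p.2))
        ++ (pvSeenRec hd.keys (R.map (·.1))).map
            (fun h => (h, pvUpd k (pvCol h R) PySem.Dict.empty)) := by
  induction R with
  | nil =>
    intro hd hnd hne
    simp [pvSeenRec, pvCol, pvUpd]
  | cons p R ih =>
    obtain ⟨h, x⟩ := p
    intro hd hnd hne
    have hitems_ne : ∀ q ∈ hd.items, q.1 ≠ "" := by
      intro q hq hq1
      exact hne (hq1 ▸ List.mem_map_of_mem hq)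
    have hmapfst : (((h, x) :: R).map (·.1)) = h :: R.map (·.1) := rfl
    by_cases hh : h = ""
    · subst hh
      rw [List.foldl_cons]
      have hstep : pvStep k hd ("", x) = hd := by simp [pvStep]
      rw [hstep, ih hd hnd hne]
      congr 1
      · refine List.map_congr_left fun q hq => ?_
        rw [pvCol_cons, if_neg (fun he => hitems_ne q hq he.symm)]
      · rw [hmapfst, pvSeenRec, if_neg (by simp)]
        refine List.map_congr_left fun h' hh' => ?_
        rw [pvCol_cons, if_neg (fun he => (pv_mem_seenRec hh').1 he.symm)]
    · rw [List.foldl_cons, pvStep_eq k hd h x hh]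
      set m := hd.getD h PySem.Dict.empty with hm
      set M := m.insert k (m.getD k [] ++ [x]) with hM
      by_cases hc : hd.contains h
      · have hkeys : (hd.insert h M).keys = hd.keys := PySem.Dict.keys_insert_of_contains _ _ hc
        have hitems : (hd.insert h M).items
            = hd.items.map (fun q => if q.1 == h then (h, M) else q) :=
          PySem.Dict.items_insert_of_contains _ _ hc
        rw [ih _ (hkeys ▸ hnd) (hkeys ▸ hne), hkeys, hitems, List.map_map]
        congr 1
        · refine List.map_congr_left fun q hq => ?_
          obtain ⟨q1, q2⟩ := q
          by_cases hqh : q1 = h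
          · have hq2 : q2 = m := by
              rw [hm, ← hqh]
              exact (PySem.Dict.getD_of_mem_items hd hq hnd PySem.Dict.empty).symm
            subst hqh
            simp only [Function.comp, BEq.rfl, if_pos]
            rw [pvCol_cons, if_pos rfl, hq2, hM, pv_U]
          · simp only [Function.comp, beq_iff_eq, hqh, if_false]
            rw [pvCol_cons, if_neg (fun he => hqh he.symm)]
        · rw [hmapfst, pvSeenRec, if_neg (by
            rintro ⟨-, hnotin⟩
            exact hnotin ((PySem.Dict.contains_iff_mem_keys _ _).mp hc))]
          refine List.map_congr_left fun h' hh' => ?_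
          have h'ne : h' ≠ h := fun he =>
            (pv_mem_seenRec hh').2.1 (he ▸ (PySem.Dict.contains_iff_mem_keys _ _).mp hc)
          rw [pvCol_cons, if_neg (fun he => h'ne he.symm)]
      · have hcm : h ∉ hd.keys := fun hmem =>
          hc ((PySem.Dict.contains_iff_mem_keys _ _).mpr hmem)
        have hm0 : m = PySem.Dict.empty := by
          rw [hm]; exact PySem.Dict.getD_of_not_contains _ _ (by simpa using hc)
        have hkeys : (hd.insert h M).keys = hd.keys ++ [h] :=
          PySem.Dict.keys_insert_of_not_contains _ _ (by simpa using hc)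
        have hitems : (hd.insert h M).items = hd.items ++ [(h, M)] :=
          PySem.Dict.items_insert_of_not_contains _ _ (by simpa using hc)
        have hnd' : (hd.keys ++ [h]).Nodup := by
          simp [List.nodup_append, hnd]
          exact fun a ha he => hcm (he ▸ ha)
        have hne' : "" ∉ hd.keys ++ [h] := by
          simp [hne, Ne.symm hh]
        rw [ih _ (hkeys ▸ hnd') (hkeys ▸ hne'), hkeys, hitems, List.map_append,
          hmapfst, pvSeenRec, if_pos ⟨hh, hcm⟩, List.map_cons, List.append_assoc]
        congr 1
        · refine List.map_congr_left fun q hq => ?_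
          have hqh : q.1 ≠ h := fun he => hcm (he ▸ List.mem_map_of_mem hq)
          rw [pvCol_cons, if_neg (fun he => hqh he.symm)]
        · simp only [List.map_cons, List.map_nil, List.singleton_append]
          congr 1
          · show (h, pvUpd k (pvCol h R) M) = (h, pvUpd k (pvCol h ((h, x) :: R)) PySem.Dict.empty)
            rw [pvCol_cons, if_pos rfl, hM, hm0, pv_U]
          · refine List.map_congr_left fun h' hh' => ?_
            have h'ne : h' ≠ h := fun he =>
              (pv_mem_seenRec hh').2.1 (he ▸ (by simp : h ∈ hd.keys ++ [h]))
            rw [pvCol_cons, if_neg (fun he => h'ne he.symm)]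

theorem pvA1 (H : List String) (k : String) (vs : List String) (hlen : vs.length ≤ H.length)
    (hd : PySem.Dict String (PySem.Dict String (List String))) :
    (PySem.List.pyRange 0 (vs.length : Int) 1).foldl (pvInnerA (some H) k vs) hd
      = (H.zip vs).foldl (pvStep k) hd := by
  have hz : (H.zip vs).length = vs.length := by simp [Nat.min_eq_right hlen]
  have hcongr : (PySem.List.pyRange 0 (vs.length : Int) 1).foldl (pvInnerA (some H) k vs) hd
      = (PySem.List.pyRange 0 (((H.zip vs).length : Nat) : Int) 1).foldl
          (fun acc j => pvStep k acc (PySem.List.pyGetD (H.zip vs) j ("", ""))) hd := by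
    rw [hz]
    apply PySem.List.foldl_congr_mem
    intro acc i hi
    have hi' := (PySem.List.mem_pyRange_one).mp hi
    obtain ⟨j, rfl⟩ := Int.eq_ofNat_of_zero_le hi'.1
    have hj : j < vs.length := by exact_mod_cast hi'.2
    have hjH : j < H.length := lt_of_lt_of_le hj hlen
    have hjz : j < (H.zip vs).length := hz ▸ hj
    have h1 : PySem.List.pyGet? H (j : Int) = some H[j] := by
      rw [PySem.List.pyGet?_natCast]
      simp [hjH]
    have h2 : PySem.List.pyGet? vs (j : Int) = some vs[j] := by
      rw [PySem.List.pyGet?_natCast]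
      simp [hj]
    have h3 : PySem.List.pyGetD (H.zip vs) (j : Int) ("", "") = (H[j], vs[j]) := by
      rw [PySem.List.pyGetD_natCast]
      rw [List.getD_eq_getElem _ _ hjz, List.getElem_zip]
    rw [h3]
    show pvInnerA (some H) k vs acc (j : Int) = pvStep k acc (H[j], vs[j])
    rw [pvInnerA, Option.bind_some, h1]
    by_cases he : H[j] = ""
    · simp [he, pvStep]
    · simp only [he, if_false, h2, pvStep]
  rw [hcongr]
  exact PySem.List.foldl_pyRange_zero_pyGetD (H.zip vs) ("", "") (pvStep k) hd


-- positions column: indices of the rows whose house is h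
def pvColP (h : String) (R : List (Int × String)) : List Int :=
  (R.filter (fun p => p.2 = h)).map (·.1)

theorem pvColP_cons (h : String) (p : Int × String) (R : List (Int × String)) :
    pvColP h (p :: R) = if p.2 = h then p.1 :: pvColP h R else pvColP h R := by
  by_cases hg : p.2 = h <;> simp [pvColP, hg]

-- seenRec over a sublist of forbidden keys is a filter of seenRec from scratch
theorem pv_seenRec_sub : ∀ (H ks : List String),
    pvSeenRec ks H = (pvSeenRec [] H).filter (fun h => decide (h ∉ ks)) := by
  intro H
  induction H with
  | nil => intro ks; simp [pvSeenRec]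
  | cons a t ih =>
    intro ks
    by_cases ha : a = ""
    · subst ha
      rw [pvSeenRec, if_neg (by simp), pvSeenRec, if_neg (by simp), ih]
    · by_cases hk : a ∈ ks
      · rw [pvSeenRec, if_neg (by simp [hk]), pvSeenRec, if_pos ⟨ha, by simp⟩,
          List.filter_cons, if_neg (by simpa using hk), ih ks, List.nil_append, ih [a],
          List.filter_filter]
        refine List.filter_congr fun h hh => ?_
        by_cases hks : h ∈ ks
        · simp [hks]
        · simp [hks, show ¬ h = a from fun he => hks (he ▸ hk)]
      · rw [pvSeenRec, if_pos ⟨ha, hk⟩, pvSeenRec, if_pos ⟨ha, by simp⟩,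
          List.filter_cons, if_pos (by simpa using hk), ih (ks ++ [a]), List.nil_append, ih [a],
          List.filter_filter]
        refine congrArg _ (List.filter_congr fun h hh => ?_)
        by_cases hks : h ∈ ks <;> by_cases hha : h = a <;>
          simp [hks, hha]

-- seenRec of a prefix is a filter of seenRec of the whole list
theorem pv_seenRec_take : ∀ (H : List String) (n : Nat) (ks : List String),
    pvSeenRec ks (H.take n) = (pvSeenRec ks H).filter (fun h => decide (h ∈ H.take n)) := by
  intro H
  induction H with
  | nil => intro n ks; simp [pvSeenRec]
  | cons a t ih =>
    intro n ks
    cases n with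
    | zero => simp [pvSeenRec]
    | succ n =>
      rw [List.take_succ_cons]
      by_cases hc : a ≠ "" ∧ a ∉ ks
      · rw [pvSeenRec, if_pos hc, pvSeenRec, if_pos hc, List.filter_cons,
          if_pos (by simp), ih n (ks ++ [a])]
        refine congrArg _ (List.filter_congr fun h hh => ?_)
        have hmem := pv_mem_seenRec hh
        have hne : h ≠ a := fun he => hmem.2.1 (he ▸ by simp)
        simp [hne]
      · rw [pvSeenRec, if_neg hc, pvSeenRec, if_neg hc, ih n ks]
        refine List.filter_congr fun h hh => ?_
        have hmem := pv_mem_seenRec hh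
        have hne : h ≠ a := by
          rintro rfl
          rcases not_and_or.mp hc with h1 | h1
          · exact hmem.1 (not_not.mp (by simpa using h1))
          · exact hmem.2.1 (not_not.mp h1)
        simp [hne]

-- a house has values in a column iff it occurs within the column's prefix of the house list
theorem pv_col_mem_of_ne (H vs : List String) (h : String)
    (hne : pvCol h (H.zip vs) ≠ []) : h ∈ H.take vs.length := by
  have hf : (H.zip vs).filter (fun p => decide (p.1 = h)) ≠ [] := by
    intro h0
    exact hne (by simp [pvCol, h0])
  obtain ⟨p, hp⟩ := List.exists_mem_of_ne_nil _ hf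
  have hmem := List.mem_filter.mp hp
  have h2 : p.1 = h := by simpa using hmem.2
  obtain ⟨j, hj, hpj⟩ := List.getElem_of_mem hmem.1
  have hjlen : j < H.length ∧ j < vs.length := by
    simpa [Nat.lt_min] using hj
  have hjt : j < (H.take vs.length).length := by
    simp [List.length_take]
    omega
  have hval : (H.take vs.length)[j] = h := by
    rw [List.getElem_take]
    have := congrArg Prod.fst hpj
    rwa [List.getElem_zip, h2] at this
  exact hval ▸ List.getElem_mem hjt

-- characterization of B's grouping pass (house -> indices), mirroring pvG
theorem pv_hiG : ∀ (R : List (Int × String)) (d : PySem.Dict String (List Int)),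
    d.keys.Nodup → "" ∉ d.keys →
    (R.foldl (fun hi p =>
        if p.2 = "" then hi else hi.insert p.2 (hi.getD p.2 [] ++ [p.1])) d).items
      = d.items.map (fun q => (q.1, q.2 ++ pvColP q.1 R))
        ++ (pvSeenRec d.keys (R.map (·.2))).map (fun h => (h, pvColP h R)) := by
  intro R
  induction R with
  | nil =>
    intro d hnd hne
    simp [pvSeenRec, pvColP]
  | cons p R ih =>
    obtain ⟨i, h⟩ := p
    intro d hnd hne
    have hitems_ne : ∀ q ∈ d.items, q.1 ≠ "" := by
      intro q hq hq1
      exact hne (hq1 ▸ List.mem_map_of_mem hq)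
    have hmapsnd : (((i, h) :: R).map (·.2)) = h :: R.map (·.2) := rfl
    by_cases hh : h = ""
    · subst hh
      rw [List.foldl_cons, if_pos rfl, ih d hnd hne]
      congr 1
      · refine List.map_congr_left fun q hq => ?_
        rw [pvColP_cons, if_neg (fun he => hitems_ne q hq he.symm)]
      · rw [hmapsnd, pvSeenRec, if_neg (by simp)]
        refine List.map_congr_left fun h' hh' => ?_
        rw [pvColP_cons, if_neg (fun he => (pv_mem_seenRec hh').1 he.symm)]
    · rw [List.foldl_cons, if_neg hh]
      by_cases hc : d.contains h
      · have hkeys : (d.insert h (d.getD h [] ++ [i])).keys = d.keys :=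
          PySem.Dict.keys_insert_of_contains _ _ hc
        have hitems : (d.insert h (d.getD h [] ++ [i])).items
            = d.items.map (fun q => if q.1 == h then (h, d.getD h [] ++ [i]) else q) :=
          PySem.Dict.items_insert_of_contains _ _ hc
        rw [ih _ (hkeys ▸ hnd) (hkeys ▸ hne), hkeys, hitems, List.map_map]
        congr 1
        · refine List.map_congr_left fun q hq => ?_
          obtain ⟨q1, q2⟩ := q
          by_cases hqh : q1 = h
          · have hq2 : d.getD h [] = q2 := by
              rw [← hqh]
              exact PySem.Dict.getD_of_mem_items d hq hnd []
            subst hqh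
            simp only [Function.comp, BEq.rfl, if_pos]
            rw [pvColP_cons, if_pos rfl, hq2]
            simp
          · simp only [Function.comp, beq_iff_eq, hqh, if_false]
            rw [pvColP_cons, if_neg (fun he => hqh he.symm)]
        · rw [hmapsnd, pvSeenRec, if_neg (by
            rintro ⟨-, hnotin⟩
            exact hnotin ((PySem.Dict.contains_iff_mem_keys _ _).mp hc))]
          refine List.map_congr_left fun h' hh' => ?_
          have h'ne : h' ≠ h := fun he =>
            (pv_mem_seenRec hh').2.1 (he ▸ (PySem.Dict.contains_iff_mem_keys _ _).mp hc)
          rw [pvColP_cons, if_neg (fun he => h'ne he.symm)]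
      · have hcm : h ∉ d.keys := fun hmem =>
          hc ((PySem.Dict.contains_iff_mem_keys _ _).mpr hmem)
        have hg0 : d.getD h [] = [] := PySem.Dict.getD_of_not_contains d [] (by simpa using hc)
        have hkeys : (d.insert h (d.getD h [] ++ [i])).keys = d.keys ++ [h] :=
          PySem.Dict.keys_insert_of_not_contains _ _ (by simpa using hc)
        have hitems : (d.insert h (d.getD h [] ++ [i])).items = d.items ++ [(h, d.getD h [] ++ [i])] :=
          PySem.Dict.items_insert_of_not_contains _ _ (by simpa using hc)
        have hnd' : (d.keys ++ [h]).Nodup := by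
          simp [List.nodup_append, hnd]
          exact fun a ha he => hcm (he ▸ ha)
        have hne' : "" ∉ d.keys ++ [h] := by
          simp [hne, Ne.symm hh]
        rw [ih _ (hkeys ▸ hnd') (hkeys ▸ hne'), hkeys, hitems, List.map_append,
          hmapsnd, pvSeenRec, if_pos ⟨hh, hcm⟩, List.map_cons, List.append_assoc]
        congr 1
        · refine List.map_congr_left fun q hq => ?_
          have hqh : q.1 ≠ h := fun he => hcm (he ▸ List.mem_map_of_mem hq)
          rw [pvColP_cons, if_neg (fun he => hqh he.symm)]
        · simp only [List.map_cons, List.map_nil, List.singleton_append]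
          congr 1
          · rw [pvColP_cons, if_pos rfl, hg0]
            simp
          · refine List.map_congr_left fun h' hh' => ?_
            have h'ne : h' ≠ h := fun he =>
              (pv_mem_seenRec hh').2.1 (he ▸ (by simp : h ∈ d.keys ++ [h]))
            rw [pvColP_cons, if_neg (fun he => h'ne he.symm)]

theorem pvColNe (H : List String) (h : String) (vs : List String)
    (hlen : vs.length ≤ H.length) (hmem : h ∈ H.take vs.length) : pvCol h (H.zip vs) ≠ [] := by
  obtain ⟨i, hi, hHi⟩ := List.getElem_of_mem hmem
  rw [List.length_take] at hi
  rw [List.getElem_take] at hHi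
  have hiz : i < (H.zip vs).length := by simp; omega
  have hzi : (H[i], vs[i]) ∈ H.zip vs := by
    have := List.getElem_mem hiz
    rwa [List.getElem_zip] at this
  have hfm : (H[i], vs[i]) ∈ (H.zip vs).filter (fun p => p.1 = h) :=
    List.mem_filter.mpr ⟨hzi, by simp [hHi]⟩
  intro hnil
  have hm2 : vs[i] ∈ pvCol h (H.zip vs) := by
    rw [pvCol]; exact List.mem_map_of_mem hfm
  rw [hnil] at hm2
  exact absurd hm2 (List.not_mem_nil)

-- B's per-column comprehension over the index map equals the zip-column
theorem pv_vals (h : String) (vs : List String) : ∀ (H : List String) (k : Nat) (acc : List String),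
    (pvColP h (PySem.List.enumerate H (k : Int))).foldl (fun acc i =>
        if i < (vs.length : Int) then acc ++ [PySem.List.pyGetD vs i ""] else acc) acc
      = acc ++ pvCol h (H.zip (vs.drop k)) := by
  intro H
  induction H with
  | nil => intro k acc; simp [PySem.List.enumerate, pvColP, pvCol]
  | cons a t ih =>
    intro k acc
    rw [PySem.List.enumerate_cons, pvColP_cons]
    have hfst : (((k : Int), a)).1 = (k : Int) := rfl
    have hcast : ((k : Int) + 1) = ((k + 1 : Nat) : Int) := by push_cast; ring
    by_cases hk : k < vs.length
    · have hdrop : vs.drop k = vs[k] :: vs.drop (k + 1) := List.drop_eq_getElem_cons hk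
      have hget' : PySem.List.pyGetD vs (k : Int) "" = vs[k] := by
        rw [PySem.List.pyGetD_natCast]
        simp [hk]
      by_cases hah : a = h
      · rw [if_pos hah, List.foldl_cons, hfst, if_pos (by exact_mod_cast hk), hget', hcast,
          ih (k + 1) (acc ++ [vs[k]]), hdrop, List.zip_cons_cons, pvCol_cons, if_pos hah]
        simp
      · rw [if_neg hah, hcast, ih (k + 1) acc, hdrop, List.zip_cons_cons, pvCol_cons,
          if_neg hah]
    · have hdrop : vs.drop k = [] := List.drop_eq_nil_of_le (by omega)
      have hdrop' : vs.drop (k + 1) = [] := List.drop_eq_nil_of_le (by omega)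
      by_cases hah : a = h
      · rw [if_pos hah, List.foldl_cons, hfst, if_neg (by exact_mod_cast hk), hcast,
          ih (k + 1) acc, hdrop, hdrop']
        simp [pvCol]
      · rw [if_neg hah, hcast, ih (k + 1) acc, hdrop, hdrop']
        simp [pvCol]

-- characterization of B's inner (house-major) pass
theorem pvGB (k : String) (colZ : String → List String) : ∀ (S : List String)
    (hd : PySem.Dict String (PySem.Dict String (List String))), S.Nodup → hd.keys.Nodup →
    (S.foldl (fun hd h => if colZ h = [] then hd
        else hd.insert h ((hd.getD h PySem.Dict.empty).insert k (colZ h))) hd).items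
      = hd.items.map (fun q =>
          (q.1, if q.1 ∈ S ∧ colZ q.1 ≠ [] then q.2.insert k (colZ q.1) else q.2))
        ++ (S.filter (fun h => ¬ hd.contains h ∧ colZ h ≠ [])).map
            (fun h => (h, PySem.Dict.empty.insert k (colZ h))) := by
  intro S
  induction S with
  | nil =>
    intro hd _ _
    simp
  | cons h S ih =>
    intro hd hS hnd
    have hhS : h ∉ S := (List.nodup_cons.mp hS).1
    have hS' : S.Nodup := (List.nodup_cons.mp hS).2
    rw [List.foldl_cons]
    by_cases hz : colZ h = []
    · rw [if_pos hz, ih hd hS' hnd, List.filter_cons, if_neg (by simp [hz])]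
      congr 1
      refine List.map_congr_left fun q hq => ?_
      by_cases hqh : q.1 = h
      · simp [hqh, hz, hhS]
      · simp only [List.mem_cons, hqh, false_or]
    · rw [if_neg hz]
      by_cases hc : hd.contains h
      · have hkeys : (hd.insert h ((hd.getD h PySem.Dict.empty).insert k (colZ h))).keys
            = hd.keys := PySem.Dict.keys_insert_of_contains _ _ hc
        have hitems : (hd.insert h ((hd.getD h PySem.Dict.empty).insert k (colZ h))).items
            = hd.items.map (fun q => if q.1 == h
                then (h, (hd.getD h PySem.Dict.empty).insert k (colZ h)) else q) :=
          PySem.Dict.items_insert_of_contains _ _ hc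
        rw [ih _ hS' (hkeys ▸ hnd), hitems, List.map_map]
        congr 1
        · refine List.map_congr_left fun q hq => ?_
          obtain ⟨q1, q2⟩ := q
          by_cases hqh : q1 = h
          · have hq2 : hd.getD q1 PySem.Dict.empty = q2 :=
              PySem.Dict.getD_of_mem_items hd hq hnd PySem.Dict.empty
            subst hqh
            simp only [Function.comp, BEq.rfl, if_pos, hq2]
            simp [hhS, hz]
          · simp only [Function.comp, beq_iff_eq, hqh, if_false]
            simp only [List.mem_cons, hqh, false_or]
        · rw [List.filter_cons, if_neg (by simp [hc])]
          refine congrArg _ (List.filter_congr fun h' hh' => ?_)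
          have h'ne : h' ≠ h := fun he => hhS (he ▸ hh')
          rw [PySem.Dict.contains_insert]
          simp [h'ne]
      · have hkeys : (hd.insert h ((hd.getD h PySem.Dict.empty).insert k (colZ h))).keys
            = hd.keys ++ [h] := PySem.Dict.keys_insert_of_not_contains _ _ (by simpa using hc)
        have hitems : (hd.insert h ((hd.getD h PySem.Dict.empty).insert k (colZ h))).items
            = hd.items ++ [(h, (hd.getD h PySem.Dict.empty).insert k (colZ h))] :=
          PySem.Dict.items_insert_of_not_contains _ _ (by simpa using hc)
        have hcm : h ∉ hd.keys := fun hmem =>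
          hc ((PySem.Dict.contains_iff_mem_keys _ _).mpr hmem)
        have hg0 : hd.getD h PySem.Dict.empty = PySem.Dict.empty :=
          PySem.Dict.getD_of_not_contains hd PySem.Dict.empty (by simpa using hc)
        have hnd' : (hd.keys ++ [h]).Nodup := by
          simp [List.nodup_append, hnd]
          exact fun a ha he => hcm (he ▸ ha)
        rw [ih _ hS' (hkeys ▸ hnd'), hitems, List.map_append, List.filter_cons,
          if_pos (by simp [hc, hz]), List.map_cons, List.append_assoc]
        congr 1
        · refine List.map_congr_left fun q hq => ?_
          have hqh : q.1 ≠ h := fun he => hcm (he ▸ List.mem_map_of_mem hq)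
          simp only [List.mem_cons, hqh, false_or]
        · simp only [List.map_cons, List.map_nil, List.singleton_append]
          congr 1
          · simp [hhS, hg0]
          · refine congrArg _ (List.filter_congr fun h' hh' => ?_)
            have h'ne : h' ≠ h := fun he => hhS (he ▸ hh')
            rw [PySem.Dict.contains_insert]
            simp [h'ne]

-- one column processed: A's row pass and B's house pass produce the same dict
theorem pv_step_eq_AB (H : List String) (k : String) (vs : List String)
    (hd : PySem.Dict String (PySem.Dict String (List String)))
    (hlen : vs.length ≤ H.length) (hnd : hd.keys.Nodup) (hne : "" ∉ hd.keys)
    (hsub : ∀ q ∈ hd.items, q.1 ∈ pvSeenRec [] H)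
    (hfresh : ∀ q ∈ hd.items, q.2.contains k = false) :
    (H.zip vs).foldl (pvStep k) hd
      = (pvSeenRec [] H).foldl (fun hd h => if pvCol h (H.zip vs) = [] then hd
          else hd.insert h ((hd.getD h PySem.Dict.empty).insert k (pvCol h (H.zip vs)))) hd := by
  apply PySem.Dict.ext
  rw [pvG k (H.zip vs) hd hnd hne,
    pvGB k (fun h => pvCol h (H.zip vs)) (pvSeenRec [] H) hd (pv_seenRec_nodup _ _) hnd]
  congr 1
  · refine List.map_congr_left fun q hq => ?_
    have hqS : q.1 ∈ pvSeenRec [] H := hsub q hq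
    by_cases hz : pvCol q.1 (H.zip vs) = []
    · rw [pvUpd, if_pos hz]
      simp [hz]
    · rw [pvUpd, if_neg hz,
        PySem.Dict.getD_of_not_contains q.2 [] (hfresh q hq), List.nil_append]
      simp [hqS, hz]
  · rw [pv_mapFstZip vs H hlen, pv_seenRec_take H vs.length hd.keys, pv_seenRec_sub H hd.keys,
      List.filter_filter]
    have hfe : ∀ h ∈ pvSeenRec [] H,
        (decide (h ∈ H.take vs.length) && decide (h ∉ hd.keys))
          = (decide (¬ hd.contains h ∧ pvCol h (H.zip vs) ≠ [])) := by
      intro h _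
      have hiff : pvCol h (H.zip vs) ≠ [] ↔ h ∈ H.take vs.length :=
        ⟨pv_col_mem_of_ne H vs h, fun hm => pvColNe H h vs hlen hm⟩
      rw [PySem.Dict.contains_eq_decide_mem_keys]
      by_cases h1 : h ∈ hd.keys <;> by_cases h2 : h ∈ H.take vs.length <;>
        simp [h1, h2, hiff]
    rw [List.filter_congr hfe]
    refine List.map_congr_left fun h hh => ?_
    have hmf := List.mem_filter.mp hh
    have hz : pvCol h (H.zip vs) ≠ [] := by
      have := hmf.2
      simp only [decide_eq_true_eq] at this
      exact this.2
    rw [pvUpd, if_neg hz]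
    simp

-- the whole outer loop: A's fold equals B's fold
theorem pvAB (H : List String) : ∀ (cols : List (String × List String))
    (hd : PySem.Dict String (PySem.Dict String (List String))),
    (cols.map (·.1)).Nodup →
    (∀ kv ∈ cols, kv.2.length ≤ H.length) →
    hd.keys.Nodup → "" ∉ hd.keys →
    (∀ q ∈ hd.items, q.1 ∈ pvSeenRec [] H) →
    (∀ q ∈ hd.items, ∀ kv ∈ cols, q.2.contains kv.1 = false) →
    cols.foldl (fun hd kv => (H.zip kv.2).foldl (pvStep kv.1) hd) hd
      = cols.foldl (fun hd kv => (pvSeenRec [] H).foldl (fun hd h =>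
          if pvCol h (H.zip kv.2) = [] then hd
          else hd.insert h ((hd.getD h PySem.Dict.empty).insert kv.1 (pvCol h (H.zip kv.2)))) hd) hd := by
  intro cols
  induction cols with
  | nil => intro hd _ _ _ _ _ _; rfl
  | cons kv cols ih =>
    intro hd hndc hlen hnd hne hsub hfresh
    rw [List.foldl_cons, List.foldl_cons,
      ← pv_step_eq_AB H kv.1 kv.2 hd (hlen kv (by simp)) hnd hne hsub
        (fun q hq => hfresh q hq kv (by simp))]
    set hd1 := (H.zip kv.2).foldl (pvStep kv.1) hd with hd1eq
    have hitems1 : hd1.items = hd.items.map (fun p => (p.1, pvUpd kv.1 (pvCol p.1 (H.zip kv.2)) p.2))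
        ++ (pvSeenRec hd.keys ((H.zip kv.2).map (·.1))).map
            (fun h => (h, pvUpd kv.1 (pvCol h (H.zip kv.2)) PySem.Dict.empty)) :=
      pvG kv.1 (H.zip kv.2) hd hnd hne
    have hkeys1 : hd1.keys = hd.keys ++ pvSeenRec hd.keys ((H.zip kv.2).map (·.1)) := by
      show hd1.items.map (·.1) = _
      rw [hitems1, List.map_append, List.map_map, List.map_map]
      congr 1
      exact (List.map_congr_left fun q _ => rfl).trans (List.map_id _)
    have hseenmem : ∀ h ∈ pvSeenRec hd.keys ((H.zip kv.2).map (·.1)),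
        h ≠ "" ∧ h ∉ hd.keys ∧ h ∈ pvSeenRec [] H := by
      intro h hh
      have hm := pv_mem_seenRec hh
      have hH : h ∈ H := by
        have := hm.2.2
        rw [pv_mapFstZip kv.2 H (hlen kv (by simp))] at this
        exact List.mem_of_mem_take this
      rcases pv_mem_seenRec_of_mem (ks := []) hH hm.1 with h0 | h0
      · simp at h0
      · exact ⟨hm.1, hm.2.1, h0⟩
    have hnd1 : hd1.keys.Nodup := by
      rw [hkeys1, List.nodup_append]
      exact ⟨hnd, pv_seenRec_nodup _ _,
        fun a ha b hb he => (hseenmem b hb).2.1 (he ▸ ha)⟩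
    have hne1 : "" ∉ hd1.keys := by
      rw [hkeys1, List.mem_append]
      rintro (h0 | h0)
      · exact hne h0
      · exact (hseenmem _ h0).1 rfl
    have hsub1 : ∀ q ∈ hd1.items, q.1 ∈ pvSeenRec [] H := by
      intro q hq
      rw [hitems1] at hq
      rcases List.mem_append.mp hq with hq | hq
      · obtain ⟨p, hp, rfl⟩ := List.mem_map.mp hq
        exact hsub p hp
      · obtain ⟨h, hh, rfl⟩ := List.mem_map.mp hq
        exact (hseenmem h hh).2.2
    have hfresh1 : ∀ q ∈ hd1.items, ∀ kv' ∈ cols, q.2.contains kv'.1 = false := by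
      intro q hq kv' hkv'
      have hne' : kv'.1 ≠ kv.1 := by
        intro he
        have := List.nodup_cons.mp hndc
        exact this.1 (List.mem_map.mpr ⟨kv', hkv', he⟩)
      have hcontains : ∀ (m : PySem.Dict String (List String)),
          m.contains kv'.1 = false →
          (pvUpd kv.1 (pvCol q.1 (H.zip kv.2)) m).contains kv'.1 = false := by
        intro m hm
        rw [pvUpd]
        split
        · exact hm
        · rw [PySem.Dict.contains_insert]
          simp [hne', hm]
      rw [hitems1] at hq
      rcases List.mem_append.mp hq with hq | hq
      · obtain ⟨p, hp, rfl⟩ := List.mem_map.mp hq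
        exact hcontains p.2 (hfresh p hp kv' (List.mem_cons_of_mem _ hkv'))
      · obtain ⟨h, hh, hqe⟩ := List.mem_map.mp hq
        have : q.2 = pvUpd kv.1 (pvCol h (H.zip kv.2)) PySem.Dict.empty := by
          rw [← hqe]
        rw [this]
        have hq1 : q.1 = h := by rw [← hqe]
        rw [← hq1] at *
        exact hcontains PySem.Dict.empty (by simp)
    exact ih hd1 (List.nodup_cons.mp hndc).2 (fun kv' h' => hlen kv' (List.mem_cons_of_mem _ h'))
      hnd1 hne1 hsub1 hfresh1

theorem pv_main (content : List (String × List String)) (hpre : Pre_separateHouses content) :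
    separateHouses content = separateHouses_alt content := by
  have hnd0 : ((PySem.Dict.ofList content).items.map (fun x => x.1)).Nodup :=
    PySem.Dict.nodup_keys_ofList content
  have hA : separateHouses content
      = (((PySem.Dict.ofList content).items.foldl (fun hd kv =>
          if kv.1 = "Hogwarts House" then hd
          else (PySem.List.pyRange 0 (kv.2.length : Int) 1).foldl
            (pvInnerA ((PySem.Dict.ofList content).get? "Hogwarts House") kv.1 kv.2) hd)
          PySem.Dict.empty).items.map (fun p => (p.1, p.2.items))) := rfl
  have hB : separateHouses_alt content
      = (((PySem.Dict.ofList content).items.foldl (fun hd kv =>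
          if kv.1 = "Hogwarts House" then hd
          else ((PySem.List.enumerate
              ((PySem.Dict.ofList content).getD "Hogwarts House" [])).foldl (fun hi p =>
                if p.2 = "" then hi else hi.insert p.2 (hi.getD p.2 [] ++ [p.1]))
              PySem.Dict.empty).items.foldl (fun hd hp =>
            let vals := hp.2.foldl (fun acc i =>
              if i < (kv.2.length : Int) then acc ++ [PySem.List.pyGetD kv.2 i ""] else acc) []
            if vals = [] then hd
            else hd.insert hp.1 ((hd.getD hp.1 PySem.Dict.empty).insert kv.1 vals)) hd)
          PySem.Dict.empty).items.map (fun p => (p.1, p.2.items))) := rfl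
  rw [hA, hB]
  set L := (PySem.Dict.ofList content).items with hL
  set H := (PySem.Dict.ofList content).getD "Hogwarts House" [] with hHdef
  have hrect : ∀ kv ∈ L, kv.1 ≠ "Hogwarts House" → kv.2.length ≤ H.length := hpre
  have hndk : ((L.filter (fun kv => ¬ kv.1 = "Hogwarts House")).map Prod.fst).Nodup :=
    List.Nodup.sublist (List.Sublist.map Prod.fst List.filter_sublist) hnd0
  congr 1
  -- outer ite-swap on both folds
  have hswapA : (fun (hd : PySem.Dict String (PySem.Dict String (List String)))
      (kv : String × List String) =>
      if kv.1 = "Hogwarts House" then hd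
      else (PySem.List.pyRange 0 (kv.2.length : Int) 1).foldl
        (pvInnerA ((PySem.Dict.ofList content).get? "Hogwarts House") kv.1 kv.2) hd)
      = (fun hd kv => if ¬ (kv.1 = "Hogwarts House")
          then (PySem.List.pyRange 0 (kv.2.length : Int) 1).foldl
            (pvInnerA ((PySem.Dict.ofList content).get? "Hogwarts House") kv.1 kv.2) hd
          else hd) := by
    funext hd kv
    by_cases hcase : kv.1 = "Hogwarts House" <;> simp [hcase]
  have hswapB : (fun (hd : PySem.Dict String (PySem.Dict String (List String)))
      (kv : String × List String) =>
      if kv.1 = "Hogwarts House" then hd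
      else ((PySem.List.enumerate H).foldl (fun hi p =>
          if p.2 = "" then hi else hi.insert p.2 (hi.getD p.2 [] ++ [p.1]))
          PySem.Dict.empty).items.foldl (fun hd hp =>
        let vals := hp.2.foldl (fun acc i =>
          if i < (kv.2.length : Int) then acc ++ [PySem.List.pyGetD kv.2 i ""] else acc) []
        if vals = [] then hd
        else hd.insert hp.1 ((hd.getD hp.1 PySem.Dict.empty).insert kv.1 vals)) hd)
      = (fun hd kv => if ¬ (kv.1 = "Hogwarts House")
          then ((PySem.List.enumerate H).foldl (fun hi p =>
              if p.2 = "" then hi else hi.insert p.2 (hi.getD p.2 [] ++ [p.1]))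
              PySem.Dict.empty).items.foldl (fun hd hp =>
            let vals := hp.2.foldl (fun acc i =>
              if i < (kv.2.length : Int) then acc ++ [PySem.List.pyGetD kv.2 i ""] else acc) []
            if vals = [] then hd
            else hd.insert hp.1 ((hd.getD hp.1 PySem.Dict.empty).insert kv.1 vals)) hd
          else hd) := by
    funext hd kv
    by_cases hcase : kv.1 = "Hogwarts House" <;> simp [hcase]
  rw [hswapA, hswapB, PySem.List.foldl_ite_eq_foldl_filter, PySem.List.foldl_ite_eq_foldl_filter]
  cases hhh : (PySem.Dict.ofList content).get? "Hogwarts House" with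
  | none =>
    have hH0 : H = [] := by rw [hHdef, PySem.Dict.getD_eq_get?_getD, hhh]; rfl
    have hempty : ∀ kv ∈ L.filter (fun kv => ¬ kv.1 = "Hogwarts House"), kv.2 = [] := by
      intro kv hkv
      have hkv' := List.mem_filter.mp hkv
      have := hrect kv hkv'.1 (by simpa using hkv'.2)
      rw [hH0] at this
      exact List.eq_nil_of_length_eq_zero (Nat.le_zero.mp (by simpa using this))
    have hfoldA := PySem.List.foldl_congr_mem
      (l := L.filter (fun kv => ¬ kv.1 = "Hogwarts House"))
      (f := fun hd kv => (PySem.List.pyRange 0 (kv.2.length : Int) 1).foldl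
        (pvInnerA none kv.1 kv.2) hd)
      (g := fun hd _ => hd) (init := (PySem.Dict.empty : PySem.Dict String (PySem.Dict String (List String))))
      (fun acc kv hkv => by
        show (PySem.List.pyRange 0 (kv.2.length : Int) 1).foldl
          (pvInnerA none kv.1 kv.2) acc = acc
        rw [hempty kv hkv]
        simp [PySem.List.pyRange_one_eq_nil])
    have hfoldB := PySem.List.foldl_congr_mem
      (l := L.filter (fun kv => ¬ kv.1 = "Hogwarts House"))
      (f := fun hd kv => ((PySem.List.enumerate H).foldl (fun hi p =>
          if p.2 = "" then hi else hi.insert p.2 (hi.getD p.2 [] ++ [p.1]))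
          PySem.Dict.empty).items.foldl (fun hd hp =>
        let vals := hp.2.foldl (fun acc i =>
          if i < (kv.2.length : Int) then acc ++ [PySem.List.pyGetD kv.2 i ""] else acc) []
        if vals = [] then hd
        else hd.insert hp.1 ((hd.getD hp.1 PySem.Dict.empty).insert kv.1 vals)) hd)
      (g := fun hd _ => hd) (init := (PySem.Dict.empty : PySem.Dict String (PySem.Dict String (List String))))
      (fun acc kv hkv => by
        show ((PySem.List.enumerate H).foldl (fun hi p =>
            if p.2 = "" then hi else hi.insert p.2 (hi.getD p.2 [] ++ [p.1]))
            PySem.Dict.empty).items.foldl _ acc = acc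
        rw [hH0, PySem.List.enumerate_nil]
        show (PySem.Dict.empty : PySem.Dict String (List Int)).items.foldl _ acc = acc
        rw [show (PySem.Dict.empty : PySem.Dict String (List Int)).items = [] from rfl]
        rfl)
    rw [hfoldA, hfoldB]
  | some houses =>
    have hHeq : H = houses := by rw [hHdef, PySem.Dict.getD_eq_get?_getD, hhh]; rfl
    have hlen' : ∀ kv ∈ L.filter (fun kv => ¬ kv.1 = "Hogwarts House"),
        kv.2.length ≤ houses.length := by
      intro kv hkv
      have hkv' := List.mem_filter.mp hkv
      rw [← hHeq]
      exact hrect kv hkv'.1 (by simpa using hkv'.2)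
    -- A side: index loop -> zip loop
    have hfoldA := PySem.List.foldl_congr_mem
      (l := L.filter (fun kv => ¬ kv.1 = "Hogwarts House"))
      (f := fun hd kv => (PySem.List.pyRange 0 (kv.2.length : Int) 1).foldl
        (pvInnerA (some houses) kv.1 kv.2) hd)
      (g := fun hd kv => (houses.zip kv.2).foldl (pvStep kv.1) hd)
      (init := (PySem.Dict.empty : PySem.Dict String (PySem.Dict String (List String))))
      (fun acc kv hkv => pvA1 houses kv.1 kv.2 (hlen' kv hkv) acc)
    -- B side: hi.items is seen paired with index columns
    have hhi : ((PySem.List.enumerate H).foldl (fun hi p =>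
        if p.2 = "" then hi else hi.insert p.2 (hi.getD p.2 [] ++ [p.1]))
        PySem.Dict.empty).items
        = (pvSeenRec [] houses).map (fun h => (h, pvColP h (PySem.List.enumerate houses))) := by
      rw [hHeq, pv_hiG (PySem.List.enumerate houses) PySem.Dict.empty
        (by rw [show (PySem.Dict.empty : PySem.Dict String (List Int)).keys = [] from rfl]; exact List.nodup_nil)
        (by rw [show (PySem.Dict.empty : PySem.Dict String (List Int)).keys = [] from rfl]; exact List.not_mem_nil),
        show (PySem.Dict.empty : PySem.Dict String (List Int)).items = [] from rfl,
        show (PySem.Dict.empty : PySem.Dict String (List Int)).keys = [] from rfl,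
        List.map_nil, List.nil_append, PySem.List.map_snd_enumerate]
    have hfoldB := PySem.List.foldl_congr_mem
      (l := L.filter (fun kv => ¬ kv.1 = "Hogwarts House"))
      (f := fun hd kv => ((PySem.List.enumerate H).foldl (fun hi p =>
          if p.2 = "" then hi else hi.insert p.2 (hi.getD p.2 [] ++ [p.1]))
          PySem.Dict.empty).items.foldl (fun hd hp =>
        let vals := hp.2.foldl (fun acc i =>
          if i < (kv.2.length : Int) then acc ++ [PySem.List.pyGetD kv.2 i ""] else acc) []
        if vals = [] then hd
        else hd.insert hp.1 ((hd.getD hp.1 PySem.Dict.empty).insert kv.1 vals)) hd)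
      (g := fun hd kv => (pvSeenRec [] houses).foldl (fun hd h =>
          if pvCol h (houses.zip kv.2) = [] then hd
          else hd.insert h ((hd.getD h PySem.Dict.empty).insert kv.1 (pvCol h (houses.zip kv.2)))) hd)
      (init := (PySem.Dict.empty : PySem.Dict String (PySem.Dict String (List String))))
      (fun acc kv hkv => by
        show ((PySem.List.enumerate H).foldl (fun hi p =>
            if p.2 = "" then hi else hi.insert p.2 (hi.getD p.2 [] ++ [p.1]))
            PySem.Dict.empty).items.foldl (fun hd hp =>
          let vals := hp.2.foldl (fun acc i =>
            if i < (kv.2.length : Int) then acc ++ [PySem.List.pyGetD kv.2 i ""] else acc) []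
          if vals = [] then hd
          else hd.insert hp.1 ((hd.getD hp.1 PySem.Dict.empty).insert kv.1 vals)) acc
          = (pvSeenRec [] houses).foldl (fun hd h =>
            if pvCol h (houses.zip kv.2) = [] then hd
            else hd.insert h ((hd.getD h PySem.Dict.empty).insert kv.1 (pvCol h (houses.zip kv.2)))) acc
        rw [hhi, List.foldl_map]
        apply PySem.List.foldl_congr_mem
        intro acc' h hh
        have hv : (pvColP h (PySem.List.enumerate houses)).foldl (fun acc i =>
            if i < (kv.2.length : Int) then acc ++ [PySem.List.pyGetD kv.2 i ""] else acc) []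
            = pvCol h (houses.zip kv.2) := by
          have := pv_vals h kv.2 houses 0 []
          simpa using this
        simp only [hv])
    rw [hfoldA, hfoldB]
    exact congrArg PySem.Dict.items
      (pvAB houses (L.filter (fun kv => ¬ kv.1 = "Hogwarts House")) PySem.Dict.empty
      hndk hlen'
      (by rw [show (PySem.Dict.empty : PySem.Dict String (PySem.Dict String (List String))).keys = [] from rfl]; exact List.nodup_nil)
      (by rw [show (PySem.Dict.empty : PySem.Dict String (PySem.Dict String (List String))).keys = [] from rfl]; exact List.not_mem_nil)
      (by
        intro q hq
        rw [show (PySem.Dict.empty : PySem.Dict String (PySem.Dict String (List String))).items = [] from rfl] at hq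
        exact absurd hq List.not_mem_nil)
      (by
        intro q hq
        rw [show (PySem.Dict.empty : PySem.Dict String (PySem.Dict String (List String))).items = [] from rfl] at hq
        exact absurd hq List.not_mem_nil))

-- ===== VERDICT (by name: the statement is the Claim_ definition above) =====
theorem separateHouses_spec : Claim_equal_separateHouses := by
  intro content _ hpre
  unfold Spec_separateHouses
  exact pv_main content hpre
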